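-- pv_equiv track=rewrite | github.com/Liza-IITP/Data_Structures | Main/Problems.py | generate_hollow_square
-- ===== SOURCE A (Python) =====
-- def generate_hollow_square(n):
--     """
--     Function to return a hollow square pattern of '*' of side n as a list of strings.
--
--     Parameters:
--     n (int): The size of the square.
--
--     Returns:
--     list: A list of strings where each string represents a row of the hollow square.
--     """
--     list_op = []
--     for i in range(0,n):
--         if i == 0 or i == n-1:
--             list_op.append("*"*n)
--         else:
--             list_op.append("*" + " "*(n-2) + "*")
--
--     return list_op
--
-- n = 5
-- ===== SOURCE B (Python) =====
-- def generate_hollow_square(n):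
--     """Hollow square of '*' of side n: start from a blank canvas and draw the perimeter onto it."""
--     grid = [bytearray(b' ' * n) for _ in range(n)]
--     for k in range(n):
--         grid[0][k] = grid[n - 1][k] = grid[k][0] = grid[k][n - 1] = 42  # ord('*')
--     return [row.decode('ascii') for row in grid]
-- ===== Notes on version B (the rewrite author's own statement) =====
-- stated objective: alternative
-- what changed: Instead of A's row loop that appends precomposed row templates (full border rows and a '*'+spaces+'*' inner row), B allocates a blank n-by-n canvas of spaces and then draws the perimeter onto it by stamping the four border cells of each index k, finally decoding the rows to strings.
import Mathlib
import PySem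

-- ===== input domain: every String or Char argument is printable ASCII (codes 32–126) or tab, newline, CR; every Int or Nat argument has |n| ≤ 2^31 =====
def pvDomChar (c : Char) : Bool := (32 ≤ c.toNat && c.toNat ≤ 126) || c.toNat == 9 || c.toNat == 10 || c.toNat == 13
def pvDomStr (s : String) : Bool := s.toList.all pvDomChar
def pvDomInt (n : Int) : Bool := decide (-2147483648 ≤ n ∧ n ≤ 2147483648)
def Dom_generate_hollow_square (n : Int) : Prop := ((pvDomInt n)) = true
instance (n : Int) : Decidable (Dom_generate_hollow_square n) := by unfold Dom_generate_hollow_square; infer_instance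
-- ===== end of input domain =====

-- B starts from a blank n×n canvas of spaces and draws the perimeter onto it by stamping the four
-- border cells of each index k, instead of A's loop that appends precomposed row-template strings.

-- shared primitive: Python's  s * k  on strings (exact: empty for k <= 0)
def pyStrMul (s : String) (k : Int) : String := String.ofList (PySem.List.pyRepeat s.toList k)

-- ===== PORT A =====
def generate_hollow_square (n : Int) : List String :=
  (PySem.List.pyRange 0 n 1).foldl
    (fun list_op i =>
      if i = 0 ∨ i = n - 1 then
        list_op ++ [pyStrMul "*" n]
      else
        list_op ++ ["*" ++ pyStrMul " " (n - 2) ++ "*"]) []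

-- ===== PORT B =====
-- grid[i][j] = '*'  (Python: grid[i][j] = 42 on a bytearray row; exact here because every index
-- B stamps lies in [0, n), so Python's negative-index branch never arises)
def pvStamp (g : List (List Char)) (i j : Int) : List (List Char) :=
  g.modify i.toNat (fun row => row.set j.toNat '*')

def generate_hollow_square_alt (n : Int) : List String :=
  ((PySem.List.pyRange 0 n 1).foldl
      (fun g k => pvStamp (pvStamp (pvStamp (pvStamp g 0 k) (n - 1) k) k 0) k (n - 1))
      (List.replicate n.toNat (List.replicate n.toNat ' '))).map
    (fun row => String.ofList row)

-- ===== PRECONDITION & SPEC =====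
def Spec_generate_hollow_square (n : Int) (out : List String) : Prop := out = generate_hollow_square_alt n
instance (n : Int) (out : List String) : Decidable (Spec_generate_hollow_square n out) := by unfold Spec_generate_hollow_square; infer_instance

-- ===== CLAIM (what is proved, stated in full; the proofs are below) =====
def Claim_equal_generate_hollow_square : Prop := ∀ (n : Int), Dom_generate_hollow_square n → Spec_generate_hollow_square n (generate_hollow_square n)

-- ===== LEMMAS AND PROOFS =====

-- the canvas after the first m stamping passes, over Nat loop indices
def pvG (n : Int) (m : Nat) : List (List Char) :=
  (List.range m).foldl
    (fun g (k : Nat) =>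
      pvStamp (pvStamp (pvStamp (pvStamp g 0 (k : Int)) (n - 1) (k : Int)) (k : Int) 0) (k : Int) (n - 1))
    (List.replicate n.toNat (List.replicate n.toNat ' '))

-- intended value of cell (i,j) after the first m stamping passes
def pvCell (N i j m : Nat) : Char :=
  if ((i = 0 ∨ i = N - 1) ∧ j < m) ∨ ((j = 0 ∨ j = N - 1) ∧ i < m) then '*' else ' '

theorem alt_eq_pvG (n : Int) :
    generate_hollow_square_alt n = (pvG n n.toNat).map (fun row => String.ofList row) := by
  unfold generate_hollow_square_alt pvG
  simp only [PySem.List.pyRange_zero, List.foldl_map]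

-- one stamp, seen through double indexing
theorem stamp_get (g : List (List Char)) (a b : Int) (i j : Nat) :
    ((pvStamp g a b)[i]?.bind (fun r => r[j]?)) =
      if a.toNat = i ∧ b.toNat = j then
        g[i]?.bind (fun r => if j < r.length then some '*' else none)
      else g[i]?.bind (fun r => r[j]?) := by
  unfold pvStamp
  rw [List.getElem?_modify]
  cases h : g[i]? with
  | none => simp
  | some r =>
    simp only [Option.bind_some]
    by_cases hai : a.toNat = i <;> by_cases hbj : b.toNat = j <;>
      simp [hai, hbj, List.getElem?_set]

-- a stamp never changes row lengths
theorem stamp_rowlen (a b : Int) (g : List (List Char)) (i' : Nat) :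
    ((pvStamp g a b)[i']?.map List.length) = (g[i']?.map List.length) := by
  unfold pvStamp
  rw [List.getElem?_modify]
  cases g[i']? <;> simp <;> split <;> simp

-- hence the '*'-writing branch of stamp_get only depends on the underlying grid's row lengths
theorem stamp_star (a b : Int) (g : List (List Char)) (i' j' : Nat) :
    ((pvStamp g a b)[i']?.bind (fun r => if j' < r.length then some '*' else none)) =
      (g[i']?.bind (fun r => if j' < r.length then some '*' else none)) := by
  have h := stamp_rowlen a b g i'
  cases hx : (pvStamp g a b)[i']? <;> cases hy : g[i']? <;> rw [hx, hy] at h <;>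
    simp at h <;> simp [h]

-- full characterisation of the canvas after m passes
theorem pvG_spec (n : Int) (m : Nat) (hm : m ≤ n.toNat) :
    (pvG n m).length = n.toNat ∧
    (∀ i j : Nat, (pvG n m)[i]?.bind (fun r => r[j]?) =
      if i < n.toNat ∧ j < n.toNat then some (pvCell n.toNat i j m) else none) := by
  induction m with
  | zero =>
    refine ⟨by simp [pvG], ?_⟩
    intro i j
    simp only [pvG, List.range_zero, List.foldl_nil, List.getElem?_replicate]
    by_cases hij : i < n.toNat ∧ j < n.toNat
    · rw [if_pos hij, if_pos hij.1]
      simp only [Option.bind_some, List.getElem?_replicate]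
      rw [if_pos hij.2]
      simp [pvCell]
    · rw [if_neg hij]
      by_cases hi : i < n.toNat
      · rw [if_pos hi]
        simp only [Option.bind_some, List.getElem?_replicate]
        rw [if_neg (by omega)]
      · rw [if_neg hi]; rfl
  | succ m ih =>
    obtain ⟨ihl, ihc⟩ := ih (by omega)
    have hn1 : 1 ≤ n := by omega
    have hG : pvG n (m + 1) =
        pvStamp (pvStamp (pvStamp (pvStamp (pvG n m) 0 (m : Int)) (n - 1) (m : Int)) (m : Int) 0)
          (m : Int) (n - 1) := by
      unfold pvG
      rw [List.range_succ, List.foldl_append, List.foldl_cons, List.foldl_nil]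
    have hlen : (pvG n (m+1)).length = n.toNat := by
      rw [hG]; unfold pvStamp; simp [ihl]
    refine ⟨hlen, ?_⟩
    have hrowfull : ∀ i : Nat, i < n.toNat →
        ∃ r, (pvG n m)[i]? = some r ∧ r.length = n.toNat := by
      intro i hi
      have h0 := ihc i 0
      rw [if_pos ⟨hi, by omega⟩] at h0
      cases hr : (pvG n m)[i]? with
      | none => rw [hr] at h0; simp at h0
      | some r =>
        refine ⟨r, rfl, ?_⟩
        have hN := ihc i n.toNat
        rw [if_neg (by omega), hr] at hN
        simp only [Option.bind_some] at hN
        rw [List.getElem?_eq_none_iff] at hN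
        have hN1 := ihc i (n.toNat - 1)
        rw [if_pos ⟨hi, by omega⟩, hr] at hN1
        simp only [Option.bind_some] at hN1
        obtain ⟨hlt, -⟩ := List.getElem?_eq_some_iff.mp hN1
        omega
    intro i j
    rw [hG, stamp_get, stamp_star, stamp_star, stamp_star,
        stamp_get, stamp_star, stamp_star,
        stamp_get, stamp_star,
        stamp_get]
    simp only [Int.toNat_natCast, Int.toNat_zero, show (n-1).toNat = n.toNat - 1 by omega]
    by_cases hij : i < n.toNat ∧ j < n.toNat
    · obtain ⟨r, hr, hrl⟩ := hrowfull i hij.1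
      rw [if_pos hij, ihc i j, if_pos hij, hr]
      simp only [Option.bind_some, hrl, if_pos hij.2]
      split_ifs with h1 h2 h3 h4 <;>
        simp only [pvCell, Option.some.injEq]
      · rw [if_pos (by omega)]
      · rw [if_pos (by omega)]
      · rw [if_pos (by omega)]
      · rw [if_pos (by omega)]
      · rw [if_congr (by omega : (((i = 0 ∨ i = n.toNat - 1) ∧ j < m) ∨ ((j = 0 ∨ j = n.toNat - 1) ∧ i < m)) ↔
              (((i = 0 ∨ i = n.toNat - 1) ∧ j < m + 1) ∨ ((j = 0 ∨ j = n.toNat - 1) ∧ i < m + 1))) rfl rfl]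
    · rw [ihc i j, if_neg hij, if_neg hij]
      by_cases hi : i < n.toNat
      · obtain ⟨r, hr, hrl⟩ := hrowfull i hi
        rw [hr]
        simp only [Option.bind_some, hrl]
        split_ifs <;> first | rfl | omega
      · have hnone : (pvG n m)[i]? = none := by
          rw [List.getElem?_eq_none_iff, ihl]; omega
        rw [hnone]
        split_ifs <;> rfl

-- A's foldl of appends is the map of the per-index row function
theorem row_fn_eq (n : Int) :
    generate_hollow_square n =
      (PySem.List.pyRange 0 n 1).map
        (fun i => if i = 0 ∨ i = n - 1 then pyStrMul "*" n
                  else "*" ++ pyStrMul " " (n - 2) ++ "*") := by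
  unfold generate_hollow_square
  rw [PySem.List.foldl_congr_mem _
      (fun list_op i =>
        if i = 0 ∨ i = n - 1 then list_op ++ [pyStrMul "*" n]
        else list_op ++ ["*" ++ pyStrMul " " (n - 2) ++ "*"])
      (fun list_op i =>
        list_op ++ [if i = 0 ∨ i = n - 1 then pyStrMul "*" n
                    else "*" ++ pyStrMul " " (n - 2) ++ "*"]) []
      (by intro acc x _; dsimp only; split <;> rfl),
    PySem.List.foldl_append_singleton_eq_map]
  simp

-- a row of the finished canvas, as a list of characters
theorem row_chars (n : Int) (i : Nat) (hi : i < n.toNat) :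
    ∃ r, (pvG n n.toNat)[i]? = some r ∧ r.length = n.toNat ∧
      (∀ j : Nat, j < n.toNat →
        r[j]? = some (if i = 0 ∨ i = n.toNat - 1 ∨ j = 0 ∨ j = n.toNat - 1 then '*' else ' ')) := by
  obtain ⟨-, hc⟩ := pvG_spec n n.toNat le_rfl
  have h0 := hc i 0
  rw [if_pos ⟨hi, by omega⟩] at h0
  cases hr : (pvG n n.toNat)[i]? with
  | none => rw [hr] at h0; simp at h0
  | some r =>
    have hlen : r.length = n.toNat := by
      have hN := hc i n.toNat
      rw [if_neg (by omega), hr] at hN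
      simp only [Option.bind_some] at hN
      rw [List.getElem?_eq_none_iff] at hN
      have hN1 := hc i (n.toNat - 1)
      rw [if_pos ⟨hi, by omega⟩, hr] at hN1
      simp only [Option.bind_some] at hN1
      obtain ⟨hlt, -⟩ := List.getElem?_eq_some_iff.mp hN1
      omega
    refine ⟨r, rfl, hlen, ?_⟩
    intro j hj
    have hcij := hc i j
    rw [if_pos ⟨hi, hj⟩, hr] at hcij
    simp only [Option.bind_some] at hcij
    rw [hcij]
    unfold pvCell
    by_cases hb : i = 0 ∨ i = n.toNat - 1 ∨ j = 0 ∨ j = n.toNat - 1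
    · rw [if_pos (by tauto), if_pos hb]
    · rw [if_neg (by tauto), if_neg hb]

-- ===== VERDICT (by name: the statement is the Claim_ definition above) =====
theorem generate_hollow_square_spec : Claim_equal_generate_hollow_square := by
  intro n _
  show generate_hollow_square n = generate_hollow_square_alt n
  rw [row_fn_eq, alt_eq_pvG]
  by_cases h0 : n ≤ 0
  · rw [PySem.List.pyRange_one_eq_nil h0]
    have : n.toNat = 0 := by omega
    simp [pvG, this]
  · have hn : 1 ≤ n := by omega
    obtain ⟨hlen, -⟩ := pvG_spec n n.toNat le_rfl
    rw [PySem.List.pyRange_zero, List.map_map]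
    apply List.ext_getElem?
    intro i
    by_cases hi : i < n.toNat
    · obtain ⟨r, hr, hrl, hrj⟩ := row_chars n i hi
      rw [List.getElem?_map, List.getElem?_map, hr, List.getElem?_range hi]
      simp only [Option.map_some, Function.comp_apply, Option.some.injEq]
      have hrowlist : ∀ (L : List Char), L.length = n.toNat →
          (∀ j : Nat, j < n.toNat →
            L[j]? = some (if i = 0 ∨ i = n.toNat - 1 ∨ j = 0 ∨ j = n.toNat - 1 then '*' else ' ')) →
          r = L := by
        intro L hL hLj
        apply List.ext_getElem?
        intro j
        by_cases hj : j < n.toNat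
        · rw [hrj j hj, hLj j hj]
        · rw [List.getElem?_eq_none (by omega), List.getElem?_eq_none (by omega)]
      by_cases hb : (i : Int) = 0 ∨ (i : Int) = n - 1
      · rw [if_pos hb]
        have hr_eq : r = List.replicate n.toNat '*' := by
          apply hrowlist
          · simp
          · intro j hj
            rw [List.getElem?_replicate, if_pos hj, if_pos (by omega)]
        rw [hr_eq]
        unfold pyStrMul
        rw [show ("*" : String).toList = ['*'] from rfl, PySem.List.pyRepeat_singleton]
      · rw [if_neg hb]
        have hN3 : 3 ≤ n := by
          rcases Nat.eq_zero_or_pos i with h | h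
          · exfalso; apply hb; left; omega
          · omega
        have hr_eq : r = '*' :: (List.replicate (n.toNat - 2) ' ' ++ ['*']) := by
          apply hrowlist
          · simp; omega
          · intro j hj
            match j with
            | 0 => rw [if_pos (by tauto)]; rfl
            | (j' + 1) =>
              rw [List.getElem?_cons_succ]
              by_cases hj' : j' < n.toNat - 2
              · rw [List.getElem?_append_left (by simp; omega), List.getElem?_replicate,
                    if_pos hj', if_neg (by omega)]
              · have hj'' : j' + 1 = n.toNat - 1 := by omega
                rw [List.getElem?_append_right (by simp; omega)]
                rw [if_pos (by omega)]
                simp [show j' - (n.toNat - 2) = 0 from by omega]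
        rw [hr_eq]
        apply String.toList_inj.mp
        unfold pyStrMul
        rw [show (" " : String).toList = [' '] from rfl, PySem.List.pyRepeat_singleton]
        simp [show (n - 2).toNat = n.toNat - 2 by omega]
    · rw [List.getElem?_map, List.getElem?_map,
          List.getElem?_eq_none (l := List.range n.toNat) (by simp; omega),
          List.getElem?_eq_none (by omega)]
      rfl
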